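-- pv_equiv track=rewrite | github.com/bwieczorek86/hyper_league | hyper_leaque_backend/helpers/create_match_schedule.py | create_balanced_round_robin
-- ===== SOURCE A (Python) =====
-- def create_balanced_round_robin(players):
--     """ Create a schedule for the teams in the list and return it"""
--     s = []
--     if len(players) % 2 == 1: players = players + [None]
--     # manipulate map (array of indexes for list) instead of list itself
--     # this takes advantage of even/odd indexes to determine home vs. away
--     n = len(players)
--     map_teams = list(range(n))
--     mid = n // 2
--     for i in range(n - 1):
--         l1 = map_teams[:mid]
--         l2 = map_teams[mid:]
--         l2.reverse()
--         round_teams = []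
--         for j in range(mid):
--             t1 = players[l1[j]]
--             t2 = players[l2[j]]
--             if j == 0 and i % 2 == 1:
--                 # flip the first match only, every other round
--                 # (this is because the first match always involves the last player in the list)
--                 round_teams.append((t2, t1))
--             else:
--                 round_teams.append((t1, t2))
--         s.append(round_teams)
--         # rotate list by n/2, leaving last element at the end
--         map_teams = map_teams[mid:-1] + map_teams[:mid] + map_teams[-1:]
--     return s
-- ===== SOURCE B (Python) =====
-- def create_balanced_round_robin(players):
--     """ Create a schedule for the teams in the list and return it"""
--     if len(players) % 2 == 1:
--         players = players + [None]
--     n = len(players)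
--     mid = n // 2
--     s = []
--     for i in range(n - 1):
--         # closed form: position p of the round-i index map holds (p + i*mid) % (n-1),
--         # except the last position which is always n-1
--         first = (players[n - 1], players[(i * mid) % (n - 1)])
--         if i % 2 == 0:
--             first = (first[1], first[0])
--         round_teams = [first]
--         for j in range(1, mid):
--             t1 = players[(j + i * mid) % (n - 1)]
--             t2 = players[(n - 1 - j + i * mid) % (n - 1)]
--             round_teams.append((t1, t2))
--         s.append(round_teams)
--     return s
-- ===== Notes on version B (the rewrite author's own statement) =====
-- stated objective: alternative
-- what changed: B replaces A's maintained-and-rotated index map (slicing, reversing and re-concatenating map_teams each round) by a closed-form index formula: position p in round i holds (p + i*mid) % (n-1) with the last slot fixed at n-1, so each pairing is computed directly from (i, j) and no index list is ever built or rotated.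
import Mathlib
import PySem

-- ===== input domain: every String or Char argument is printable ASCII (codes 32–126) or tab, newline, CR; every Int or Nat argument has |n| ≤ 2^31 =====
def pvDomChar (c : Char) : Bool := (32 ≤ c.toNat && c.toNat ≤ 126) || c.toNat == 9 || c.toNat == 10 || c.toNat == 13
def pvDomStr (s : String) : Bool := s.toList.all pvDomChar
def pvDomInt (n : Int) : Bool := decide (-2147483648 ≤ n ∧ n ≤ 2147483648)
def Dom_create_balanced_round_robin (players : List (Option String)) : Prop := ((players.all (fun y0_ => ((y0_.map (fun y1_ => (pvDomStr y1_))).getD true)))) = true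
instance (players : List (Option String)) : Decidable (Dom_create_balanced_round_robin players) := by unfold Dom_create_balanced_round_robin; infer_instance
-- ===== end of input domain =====

-- B computes each pairing by the closed-form index (p + i*mid) % (n-1) (last slot fixed at n-1)
-- instead of maintaining and rotating A's index map; alternative algorithm, same asymptotic cost.

-- ===== PORT A =====
-- inner 'for j in range(mid)' loop of A, building round_teams
def pvAInner (players : List (Option String)) (l1 l2 : List Int) (i mid : Int) :
    List (Option String × Option String) :=
  (PySem.List.pyRange 0 mid 1).foldl (fun rt j =>
    let t1 := PySem.List.pyGetD players (PySem.List.pyGetD l1 j 0) none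
    let t2 := PySem.List.pyGetD players (PySem.List.pyGetD l2 j 0) none
    if j == 0 && PySem.Int.mod i 2 == 1 then rt ++ [(t2, t1)] else rt ++ [(t1, t2)]) []

-- body of A's 'for i in range(n-1)' loop: state is (s, map_teams)
def pvAStep (players : List (Option String)) (mid : Int)
    (st : List (List (Option String × Option String)) × List Int) (i : Int) :
    List (List (Option String × Option String)) × List Int :=
  let map_teams := st.2
  let l1 := PySem.List.slice map_teams none (some mid)
  let l2 := (PySem.List.slice map_teams (some mid) none).reverse
  (st.1 ++ [pvAInner players l1 l2 i mid],
   PySem.List.slice map_teams (some mid) (some (-1)) ++ PySem.List.slice map_teams none (some mid)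
     ++ PySem.List.slice map_teams (some (-1)) none)

def create_balanced_round_robin (players : List (Option String)) :
    List (List (Option String × Option String)) :=
  let players := if players.length % 2 == 1 then players ++ [none] else players
  let n : Int := PySem.List.len players
  let map_teams : List Int := PySem.List.pyRange 0 n 1
  let mid : Int := PySem.Int.floordiv n 2
  ((PySem.List.pyRange 0 (n - 1) 1).foldl (pvAStep players mid) ([], map_teams)).1

-- ===== PORT B =====
-- round i of B: first match from the fixed last slot, the rest by the closed-form indices
def pvBRound (players : List (Option String)) (n mid i : Int) :
    List (Option String × Option String) :=
  let first0 := (PySem.List.pyGetD players (n - 1) none,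
                 PySem.List.pyGetD players (PySem.Int.mod (i * mid) (n - 1)) none)
  let first := if PySem.Int.mod i 2 == 0 then (first0.2, first0.1) else first0
  (PySem.List.pyRange 1 mid 1).foldl (fun rt j =>
    rt ++ [(PySem.List.pyGetD players (PySem.Int.mod (j + i * mid) (n - 1)) none,
            PySem.List.pyGetD players (PySem.Int.mod (n - 1 - j + i * mid) (n - 1)) none)]) [first]

def create_balanced_round_robin_alt (players : List (Option String)) :
    List (List (Option String × Option String)) :=
  let players := if players.length % 2 == 1 then players ++ [none] else players
  let n : Int := PySem.List.len players
  let mid : Int := PySem.Int.floordiv n 2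
  (PySem.List.pyRange 0 (n - 1) 1).foldl (fun s i => s ++ [pvBRound players n mid i]) []

-- ===== PRECONDITION & SPEC =====
def Spec_create_balanced_round_robin (players : List (Option String)) (out : List (List (Option String × Option String))) : Prop := out = create_balanced_round_robin_alt players
instance (players : List (Option String)) (out : List (List (Option String × Option String))) : Decidable (Spec_create_balanced_round_robin players out) := by unfold Spec_create_balanced_round_robin; infer_instance

-- ===== CLAIM (what is proved, stated in full; the proofs are below) =====
def Claim_equal_create_balanced_round_robin : Prop := ∀ (players : List (Option String)), Dom_create_balanced_round_robin players → Spec_create_balanced_round_robin players (create_balanced_round_robin players)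

-- ===== LEMMAS AND PROOFS =====

-- the index map A maintains, in closed form: round i, position p < N-1 holds (p + i*(N/2)) % (N-1),
-- the last position holds N-1
def pvMapAt (N i : Nat) : List Int :=
  (List.range (N - 1)).map (fun (p : Nat) => ((p : Int) + (i : Int) * ((N / 2 : Nat) : Int)) % ((N : Int) - 1))
    ++ [(N : Int) - 1]

lemma pv_slice_mid_neg_one (m : List Int) (M : Nat) (h : M + 1 ≤ m.length) :
    PySem.List.slice m (some (M : Int)) (some (-1)) = (m.dropLast).drop M := by
  have hm : m ≠ [] := by intro e; simp [e] at h
  simp only [PySem.List.slice, PySem.List.clampIdx, Int.reduceNeg, Int.neg_neg_iff_pos, zero_lt_one,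
    ↓reduceIte, add_neg_lt_iff_lt_add, zero_add, Nat.cast_lt_one, List.length_eq_zero_iff]
  rw [if_neg hm, if_neg (by simp : ¬ ((M : Int) < 0))]
  rw [List.dropLast_eq_take, List.drop_take]
  congr 1
  · omega
  · congr 1; simp; omega

lemma pv_mapAt_zero (N : Nat) (h : 1 ≤ N) :
    pvMapAt N 0 = PySem.List.pyRange 0 (N : Int) 1 := by
  rw [PySem.List.pyRange_one]
  have hc : ((N : Int) - 0).toNat = (N - 1) + 1 := by omega
  rw [hc, List.range_succ, List.map_append]
  unfold pvMapAt
  congr 1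
  · apply List.map_congr_left
    intro p hp
    simp only [List.mem_range] at hp
    simp only [Nat.cast_zero, zero_mul, add_zero, zero_add]
    rw [Int.emod_eq_of_lt (by omega) (by omega)]
  · simp; omega

lemma pv_rotate (N i : Nat) (h2 : 2 ≤ N) (he : N % 2 = 0) :
    PySem.List.slice (pvMapAt N i) (some ((N / 2 : Nat) : Int)) (some (-1))
      ++ PySem.List.slice (pvMapAt N i) none (some ((N / 2 : Nat) : Int))
      ++ PySem.List.slice (pvMapAt N i) (some (-1)) none
    = pvMapAt N (i + 1) := by
  have hform : ∀ j : Nat, pvMapAt N j =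
      (List.range (N - 1)).map (fun (p : Nat) => ((p : Int) + (j : Int) * ((N / 2 : Nat) : Int)) % ((N : Int) - 1))
        ++ [(N : Int) - 1] := fun _ => rfl
  have hlenF : ∀ j : Nat, ((List.range (N - 1)).map (fun (p : Nat) => ((p : Int) + (j : Int) * ((N / 2 : Nat) : Int)) % ((N : Int) - 1))).length = N - 1 := by
    intro j; simp
  have hlenm : (pvMapAt N i).length = N := by simp [pvMapAt]; omega
  have h1 : PySem.List.slice (pvMapAt N i) (some ((N / 2 : Nat) : Int)) (some (-1))
      = ((List.range (N - 1)).map (fun (p : Nat) => ((p : Int) + (i : Int) * ((N / 2 : Nat) : Int)) % ((N : Int) - 1))).drop (N / 2) := by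
    rw [pv_slice_mid_neg_one _ _ (by omega)]
    rw [hform i, List.dropLast_concat]
  have h2 : PySem.List.slice (pvMapAt N i) none (some ((N / 2 : Nat) : Int))
      = ((List.range (N - 1)).map (fun (p : Nat) => ((p : Int) + (i : Int) * ((N / 2 : Nat) : Int)) % ((N : Int) - 1))).take (N / 2) := by
    rw [PySem.List.slice_to_natCast, hform i, List.take_append_of_le_length (by rw [hlenF]; omega)]
  have h3 : PySem.List.slice (pvMapAt N i) (some (-1)) none = [(N : Int) - 1] := by
    rw [PySem.List.slice_from_neg_one, hlenm, hform i]
    have hd := List.drop_left (l₁ := (List.range (N - 1)).map (fun (p : Nat) => ((p : Int) + (i : Int) * ((N / 2 : Nat) : Int)) % ((N : Int) - 1))) (l₂ := [(N : Int) - 1])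
    rw [hlenF i] at hd
    exact hd
  rw [h1, h2, h3, hform (i + 1)]
  congr 1
  apply List.ext_getElem
  · simp only [List.length_append, List.length_drop, List.length_take, hlenF]
    have hmin : min (N / 2) (N - 1) = N / 2 := by omega
    omega
  · intro p hp hq
    simp only [List.getElem_append, List.length_drop, hlenF]
    by_cases hc : p < (N - 1) - (N / 2)
    · rw [dif_pos (by omega)]
      simp only [List.getElem_drop, List.getElem_map, List.getElem_range]
      congr 1
      push_cast
      ring
    · rw [dif_neg (by omega)]
      simp only [List.getElem_take, List.getElem_map, List.getElem_range]
      have harg : ((p - ((N - 1) - N / 2) : Nat) : Int) + (i : Int) * ((N / 2 : Nat) : Int)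
          = ((p : Int) + ((i + 1 : Nat) : Int) * ((N / 2 : Nat) : Int)) - ((N : Int) - 1) := by
        push_cast; ring_nf; omega
      rw [harg]
      rw [Int.sub_emod_right]


lemma pv_round (P : List (Option String)) (i : Nat) (h2 : 2 ≤ P.length) (he : P.length % 2 = 0) :
    pvAInner P (PySem.List.slice (pvMapAt P.length i) none (some ((P.length / 2 : Nat) : Int)))
      ((PySem.List.slice (pvMapAt P.length i) (some ((P.length / 2 : Nat) : Int)) none).reverse)
      (i : Int) ((P.length / 2 : Nat) : Int)
    = pvBRound P (P.length : Int) ((P.length / 2 : Nat) : Int) (i : Int) := by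
  set N := P.length with hN
  set M := N / 2 with hM
  have hform : pvMapAt N i =
      (List.range (N - 1)).map (fun (p : Nat) => ((p : Int) + (i : Int) * ((M : Nat) : Int)) % ((N : Int) - 1))
        ++ [(N : Int) - 1] := rfl
  set F := (List.range (N - 1)).map (fun (p : Nat) => ((p : Int) + (i : Int) * ((M : Nat) : Int)) % ((N : Int) - 1)) with hF
  have hlenF : F.length = N - 1 := by simp [hF]
  have hNpos : (0 : Int) < (N : Int) - 1 := by omega
  have hl1 : PySem.List.slice (pvMapAt N i) none (some ((M : Nat) : Int)) = F.take M := by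
    rw [PySem.List.slice_to_natCast, hform, List.take_append_of_le_length (by rw [hlenF]; omega)]
  have hl2 : (PySem.List.slice (pvMapAt N i) (some ((M : Nat) : Int)) none).reverse
      = ((N : Int) - 1) :: (F.drop M).reverse := by
    rw [PySem.List.slice_from_natCast, hform, List.drop_append_of_le_length (by rw [hlenF]; omega)]
    rw [List.reverse_append]
    simp
  rw [hl1, hl2]
  unfold pvAInner pvBRound
  simp only
  rw [show (fun (rt : List (Option String × Option String)) (j : Int) =>
        if j == 0 && PySem.Int.mod (i : Int) 2 == 1
        then rt ++ [(PySem.List.pyGetD P (PySem.List.pyGetD (((N : Int) - 1) :: (F.drop M).reverse) j 0) none,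
                     PySem.List.pyGetD P (PySem.List.pyGetD (F.take M) j 0) none)]
        else rt ++ [(PySem.List.pyGetD P (PySem.List.pyGetD (F.take M) j 0) none,
                     PySem.List.pyGetD P (PySem.List.pyGetD (((N : Int) - 1) :: (F.drop M).reverse) j 0) none)])
      = (fun rt j => rt ++ [if j == 0 && PySem.Int.mod (i : Int) 2 == 1
        then (PySem.List.pyGetD P (PySem.List.pyGetD (((N : Int) - 1) :: (F.drop M).reverse) j 0) none,
              PySem.List.pyGetD P (PySem.List.pyGetD (F.take M) j 0) none)
        else (PySem.List.pyGetD P (PySem.List.pyGetD (F.take M) j 0) none,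
              PySem.List.pyGetD P (PySem.List.pyGetD (((N : Int) - 1) :: (F.drop M).reverse) j 0) none)]) by
    funext rt j; split <;> rfl]
  rw [PySem.List.foldl_append_singleton_eq_map, PySem.List.foldl_append_singleton_eq_map]
  rw [PySem.List.pyRange_one_cons (by omega : (0:Int) < (M : Int))]
  rw [zero_add, List.map_cons, List.singleton_append]
  have ht1 : PySem.List.pyGetD (F.take M) 0 0 = ((i : Int) * (M : Int)) % ((N : Int) - 1) := by
    rw [PySem.List.pyGetD_eq_getElem _ _ (by omega) (by simp [hlenF]; omega)]
    simp [hF]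
  have ht2 : PySem.List.pyGetD (((N : Int) - 1) :: (F.drop M).reverse) 0 0 = (N : Int) - 1 :=
    PySem.List.pyGetD_zero_cons _ _ _
  refine List.cons_eq_cons.mpr ⟨?_, ?_⟩
  · -- the first match of the round
    rw [ht1, ht2]
    rcases Int.emod_two_eq (i : Int) with hm | hm <;>
      simp [hm, PySem.Int.mod_eq_emod_of_pos hNpos]
  · -- the remaining matches
    apply List.map_congr_left
    intro j hj
    rw [PySem.List.mem_pyRange_one] at hj
    obtain ⟨q, rfl⟩ : ∃ q : Nat, j = ((q + 1 : Nat) : Int) := ⟨(j - 1).toNat, by omega⟩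
    have hqM : q + 1 < M := by
      have := hj.2
      omega
    have hj0 : ((((q + 1 : Nat) : Int)) == 0) = false := by
      rw [beq_eq_false_iff_ne]
      push_cast
      omega
    rw [hj0, Bool.false_and]
    simp only [Bool.false_eq_true, if_false]
    have hu1 : PySem.List.pyGetD (F.take M) ((q + 1 : Nat) : Int) 0
        = (((q + 1 : Nat) : Int) + (i : Int) * (M : Int)) % ((N : Int) - 1) := by
      rw [PySem.List.pyGetD_eq_getElem _ _ (by omega) (by simp [hlenF]; omega)]
      simp only [Int.toNat_natCast, List.getElem_take, hF, List.getElem_map, List.getElem_range]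
    have hu2 : PySem.List.pyGetD (((N : Int) - 1) :: (F.drop M).reverse) ((q + 1 : Nat) : Int) 0
        = (((N : Int) - 1 - ((q + 1 : Nat) : Int)) + (i : Int) * (M : Int)) % ((N : Int) - 1) := by
      rw [PySem.List.pyGetD_eq_getElem _ _ (by omega)
        (by simp only [List.length_cons, List.length_reverse, List.length_drop, hlenF]; push_cast; omega)]
      simp only [Int.toNat_natCast, List.getElem_cons_succ, List.getElem_reverse,
        List.length_drop, List.getElem_drop, hF, List.getElem_map, List.getElem_range,
        List.length_map, List.length_range]
      congr 2
      omega
    rw [hu1, hu2, PySem.Int.mod_eq_emod_of_pos hNpos, PySem.Int.mod_eq_emod_of_pos hNpos]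


lemma pv_fold (P : List (Option String)) (h2 : 2 ≤ P.length) (he : P.length % 2 = 0) :
    ∀ (K a : Nat) (s : List (List (Option String × Option String))),
    ((List.range' a K).map (fun (k : Nat) => (k : Int))).foldl (pvAStep P ((P.length / 2 : Nat) : Int))
        (s, pvMapAt P.length a)
      = (s ++ (List.range' a K).map (fun (k : Nat) => pvBRound P (P.length : Int) ((P.length / 2 : Nat) : Int) (k : Int)),
         pvMapAt P.length (a + K)) := by
  intro K
  induction K with
  | zero => intro a s; simp
  | succ K ih =>
      intro a s
      rw [List.range'_succ, List.map_cons, List.foldl_cons]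
      have hstep : pvAStep P ((P.length / 2 : Nat) : Int) (s, pvMapAt P.length a) (a : Int)
          = (s ++ [pvBRound P (P.length : Int) ((P.length / 2 : Nat) : Int) (a : Int)],
             pvMapAt P.length (a + 1)) := by
        unfold pvAStep
        simp only
        rw [pv_round P a h2 he, pv_rotate P.length a h2 he]
      rw [hstep, ih (a + 1)]
      simp only [List.map_cons, List.append_assoc, List.singleton_append]
      congr 2
      omega

-- ===== VERDICT (by name: the statement is the Claim_ definition above) =====
theorem create_balanced_round_robin_spec : Claim_equal_create_balanced_round_robin := by
  intro players _
  unfold Spec_create_balanced_round_robin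
  unfold create_balanced_round_robin create_balanced_round_robin_alt
  simp only [PySem.List.len_eq]
  set Q := if players.length % 2 == 1 then players ++ [none] else players with hQ
  have hQe : Q.length % 2 = 0 := by
    rw [hQ]
    by_cases hp : players.length % 2 = 1
    · simp [hp]
      omega
    · simp [hp]
      omega
  by_cases hQ0 : Q.length = 0
  · rw [hQ0]
    rw [PySem.List.pyRange_one_eq_nil (by norm_num), PySem.List.pyRange_one_eq_nil (by norm_num)]
    simp
  · have h2 : 2 ≤ Q.length := by omega
    have hmid : PySem.Int.floordiv (Q.length : Int) 2 = ((Q.length / 2 : Nat) : Int) := by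
      rw [PySem.Int.floordiv_eq_ediv_of_pos (by norm_num)]
      omega
    simp only [hmid]
    rw [← pv_mapAt_zero Q.length (by omega)]
    have hrange : PySem.List.pyRange 0 ((Q.length : Int) - 1) 1
        = (List.range' 0 (Q.length - 1)).map (fun (k : Nat) => (k : Int)) := by
      rw [PySem.List.pyRange_one, ← List.range_eq_range']
      simp only [zero_add, sub_zero]
      rw [show ((Q.length : Int) - 1).toNat = Q.length - 1 by omega]
    rw [hrange]
    rw [pv_fold Q h2 hQe (Q.length - 1) 0 []]
    rw [PySem.List.foldl_append_singleton_eq_map]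
    simp [List.map_map, Function.comp]
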